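-- pv_equiv track=rewrite | github.com/sicklibra/Advent_Of_Code | AOC_2024/Day9/ChecksumGen2.py | findSlot
-- ===== SOURCE A (Python) =====
-- def findSlot(lst, block, jind):
--     key=lst[jind+1]
--     for i in range(jind):
--         fBlock=0
--         if lst[i]=='.':
--             test=i
--             while fBlock<block and lst[test]=='.':
--                 fBlock+=1
--                 test+=1
--         if fBlock==block:
--             replaceind=i
--             movedind=jind+1
--             for j in range(block):
--                 lst[replaceind]=key
--                 replaceind+=1
--                 lst[movedind]='.'
--                 movedind+=1
--             return lst
--     return lst
-- ===== SOURCE B (Python) =====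
-- # B: read the key once, then one left-to-right pass tracking the length of the
-- # current run of '.' cells; place the block at the first run reaching the needed size
-- # (two slice assignments) instead of A's per-start rescan. Mutates lst in place like A.
-- def findSlot(lst, block, jind):
--     key = lst[jind + 1]
--     if block <= 0:
--         return lst
--     limit = min(len(lst), jind + block - 1)
--     run = 0
--     for t in range(limit):
--         if lst[t] == '.':
--             run += 1
--             if run == block:
--                 s = t - block + 1
--                 lst[s:s + block] = [key] * block
--                 lst[jind + 1:jind + 1 + block] = ['.'] * block
--                 return lst
--         else:
--             run = 0
--     return lst
-- ===== Notes on version B (the rewrite author's own statement) =====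
-- stated objective: alternative
-- what changed: A re-scans up to `block` cells from every candidate start below jind; B makes a single left-to-right pass maintaining the length of the current run of '.' cells, places the block at the first run that reaches the required size and moves it with two slice assignments (worst-case O(jind+block) vs A's O(jind*block), though on typical inputs with short runs the measured cost is the same).
import Mathlib
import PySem

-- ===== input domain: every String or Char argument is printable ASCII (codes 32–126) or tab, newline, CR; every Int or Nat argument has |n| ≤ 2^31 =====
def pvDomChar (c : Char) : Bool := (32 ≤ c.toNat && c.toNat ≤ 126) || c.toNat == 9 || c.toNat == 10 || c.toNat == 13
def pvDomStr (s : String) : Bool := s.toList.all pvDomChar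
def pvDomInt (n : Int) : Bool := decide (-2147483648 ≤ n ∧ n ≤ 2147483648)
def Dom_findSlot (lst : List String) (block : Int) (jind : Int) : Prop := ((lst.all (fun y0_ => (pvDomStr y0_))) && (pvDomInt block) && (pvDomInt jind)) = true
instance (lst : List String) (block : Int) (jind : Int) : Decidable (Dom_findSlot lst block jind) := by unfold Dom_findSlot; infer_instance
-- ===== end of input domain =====

-- B replaces A's per-start rescan (for every candidate start below jind, re-check up to
-- `block` cells) by a single left-to-right pass that tracks the length of the current run
-- of '.' cells and places the block at the first run reaching the required size.
-- Both programs mutate `lst` in place in Python and return it; the final list is the same.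

-- ===== PORT A =====
-- the inner `while fBlock<block and lst[test]=='.'` loop; `none` from pyGet? is Python's
-- IndexError (excluded by Pre_), the port stops there
def pvWhileA (lst : List String) (block fBlock test : Int) : Int :=
  if _h : fBlock < block then
    match PySem.List.pyGet? lst test with
    | some s => if s = "." then pvWhileA lst block (fBlock + 1) (test + 1) else fBlock
    | none => fBlock
  else fBlock
termination_by (block - fBlock).toNat
decreasing_by omega

-- the `for j in range(block)` write loop; pySetD is Python's `lst[i]=v` (in range under Pre_)
def pvWriteA (lst : List String) (key : String) (replaceind movedind : Int) : Nat → List String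
  | 0 => lst
  | Nat.succ k =>
      pvWriteA (PySem.List.pySetD (PySem.List.pySetD lst replaceind key) movedind ".") key
        (replaceind + 1) (movedind + 1) k

-- the `for i in range(jind)` loop with its early return
def pvLoopA (lst : List String) (key : String) (block jind i : Int) : List String :=
  if _h : i < jind then
    let fBlock : Int := if PySem.List.pyGet? lst i = some "." then pvWhileA lst block 0 i else 0
    if fBlock = block then pvWriteA lst key i (jind + 1) block.toNat
    else pvLoopA lst key block jind (i + 1)
  else lst
termination_by (jind - i).toNat
decreasing_by omega

def findSlot (lst : List String) (block : Int) (jind : Int) : List String :=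
  match PySem.List.pyGet? lst (jind + 1) with
  | none => lst      -- key = lst[jind+1] raises IndexError (excluded by Pre_)
  | some key => pvLoopA lst key block jind 0

-- ===== PORT B =====
-- equal-length slice assignment lst[s:s+len(vals)] = vals (in range whenever B fires under Pre_)
def pvSetSeg (lst : List String) (s : Nat) (vals : List String) : List String :=
  lst.take s ++ vals ++ lst.drop (s + vals.length)

-- the single scanning loop of B: `run` is the current consecutive-'.' count
def pvLoopB (lst : List String) (key : String) (block jind : Int) (limit t : Nat) (run : Int) : List String :=
  if _h : t < limit then
    if lst.getD t "" = "." then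
      if run + 1 = block then
        pvSetSeg
          (pvSetSeg lst (t + 1 - block.toNat) (List.replicate block.toNat key))
          (jind + 1).toNat (List.replicate block.toNat ".")
      else pvLoopB lst key block jind limit (t + 1) (run + 1)
    else pvLoopB lst key block jind limit (t + 1) 0
  else lst
termination_by limit - t

def findSlot_alt (lst : List String) (block : Int) (jind : Int) : List String :=
  match PySem.List.pyGet? lst (jind + 1) with
  | none => lst      -- key = lst[jind+1] raises IndexError (excluded by Pre_)
  | some key =>
    if block ≤ 0 then lst
    else pvLoopB lst key block jind (min lst.length (jind + block - 1).toNat) 0 0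

-- ===== PRECONDITION & SPEC =====
-- Pre_ excludes exactly the inputs on which A raises IndexError: an out-of-range key index
-- jind+1, and (for block ≥ 1, jind ≥ 1 with the moved range jind+1..jind+block reaching past
-- the end) the existence of a dot run below jind that makes A scan or write past the end.
def Pre_findSlot (lst : List String) (block : Int) (jind : Int) : Prop :=
  PySem.Raise.InRange lst.length (jind + 1) ∧
  (1 ≤ block → 1 ≤ jind →
    (jind + 1 + block ≤ (lst.length : Int) ∨
     ¬ ∃ i < lst.length, (i : Int) < jind ∧
        ∀ j < lst.length, i ≤ j → (j : Int) < (i : Int) + block → lst.getD j "" = "."))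
instance (lst : List String) (block : Int) (jind : Int) : Decidable (Pre_findSlot lst block jind) := by
  unfold Pre_findSlot; infer_instance

def pvWitness_findSlot : List String × Int × Int := ([".", ".", "x", "7", "y", "z"], 2, 2)

def Spec_findSlot (lst : List String) (block : Int) (jind : Int) (out : List String) : Prop := out = findSlot_alt lst block jind
instance (lst : List String) (block : Int) (jind : Int) (out : List String) : Decidable (Spec_findSlot lst block jind out) := by unfold Spec_findSlot; infer_instance

-- ===== CLAIM (what is proved, stated in full; the proofs are below) =====
def Claim_equal_findSlot : Prop := ∀ (lst : List String) (block : Int) (jind : Int), Dom_findSlot lst block jind → Pre_findSlot lst block jind → Spec_findSlot lst block jind (findSlot lst block jind)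

-- ===== LEMMAS AND PROOFS =====

-- `pvSlot lst bN i`: positions i..i+bN-1 exist and all hold "." — a free slot of size bN at i
def pvSlot (lst : List String) (bN i : Nat) : Bool :=
  decide (i + bN ≤ lst.length ∧ ∀ k < bN, lst.getD (i + k) "" = ".")

-- the first free slot of size bN starting below `bound`
def pvFirst (lst : List String) (bN bound : Nat) : Option Nat :=
  (List.range bound).find? (pvSlot lst bN)

-- length of the consecutive-'.' run ending just before position t
def pvRun (lst : List String) : Nat → Nat
  | 0 => 0
  | t + 1 => if lst.getD t "" = "." then pvRun lst t + 1 else 0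

theorem range_find?_eq_some {p : Nat → Bool} {n s : Nat} (hs : s < n) (hp : p s = true)
    (hmin : ∀ i < s, p i = false) : (List.range n).find? p = some s := by
  induction n with
  | zero => omega
  | succ n ih =>
    rw [List.range_succ, List.find?_append]
    rcases Nat.lt_or_ge s n with h | h
    · rw [ih h]; rfl
    · have hsn : s = n := by omega
      subst hsn
      have hn : (List.range s).find? p = none := by
        rw [List.find?_eq_none]
        intro x hx
        simp only [List.mem_range] at hx
        simp [hmin x hx]
      rw [hn]; simp [hp]

theorem pvRun_ge_iff (lst : List String) :
    ∀ t j : Nat, (j ≤ pvRun lst t ↔ j ≤ t ∧ ∀ k < j, lst.getD (t - j + k) "" = ".") := by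
  intro t
  induction t with
  | zero =>
    intro j
    constructor
    · intro h
      simp only [pvRun] at h
      exact ⟨h, fun k hk => absurd hk (by omega)⟩
    · intro h; simpa [pvRun] using h.1
  | succ t ih =>
    intro j
    simp only [pvRun]
    by_cases hd : lst.getD t "" = "."
    · rw [if_pos hd]
      cases j with
      | zero => simp
      | succ j' =>
        rw [Nat.succ_le_succ_iff, ih j']
        constructor
        · rintro ⟨h1, h2⟩
          refine ⟨by omega, ?_⟩
          intro k hk
          rcases Nat.lt_or_ge k j' with hk' | hk'
          · have e : t + 1 - (j' + 1) + k = t - j' + k := by omega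
            rw [e]; exact h2 k hk'
          · have e : t + 1 - (j' + 1) + k = t := by omega
            rw [e]; exact hd
        · rintro ⟨h1, h2⟩
          refine ⟨by omega, ?_⟩
          intro k hk
          have e : t - j' + k = t + 1 - (j' + 1) + k := by omega
          rw [e]; exact h2 k (by omega)
    · rw [if_neg hd]
      constructor
      · intro h
        have hj : j = 0 := by omega
        subst hj
        exact ⟨by omega, fun k hk => absurd hk (by omega)⟩
      · rintro ⟨h1, h2⟩
        by_contra hc
        have hj : 1 ≤ j := by omega
        have hx := h2 (j - 1) (by omega)
        have e : t + 1 - j + (j - 1) = t := by omega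
        rw [e] at hx
        exact hd hx

theorem whileA_iff (lst : List String) (block : Int) :
    ∀ (d : Nat) (f : Int) (test : Nat), 0 ≤ f → f + d = block →
      (pvWhileA lst block f (test : Int) = block ↔
        ∀ k < d, test + k < lst.length ∧ lst.getD (test + k) "" = ".") := by
  intro d
  induction d with
  | zero =>
    intro f test h0 hsum
    rw [pvWhileA, dif_neg (by omega)]
    constructor
    · intro _ k hk; omega
    · intro _; omega
  | succ d ih =>
    intro f test h0 hsum
    rw [pvWhileA, dif_pos (by omega)]
    cases hg : PySem.List.pyGet? lst (test : Int) with
    | none =>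
      rw [PySem.List.pyGet?_natCast] at hg
      have hlen : lst.length ≤ test := by
        by_contra hc
        rw [List.getElem?_eq_getElem (by omega)] at hg
        simp at hg
      change f = block ↔ _
      constructor
      · intro h; omega
      · intro h; exact absurd ((h 0 (by omega)).1) (by omega)
    | some s =>
      rw [PySem.List.pyGet?_natCast] at hg
      have hlt : test < lst.length := by
        by_contra hc
        rw [List.getElem?_eq_none (by omega)] at hg
        simp at hg
      have hgd : lst.getD test "" = s := by
        rw [List.getD_eq_getElem?_getD, hg]; rfl
      change (if s = "." then pvWhileA lst block (f + 1) ((test : Int) + 1) else f) = block ↔ _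
      by_cases hdot : s = "."
      · subst hdot
        rw [if_pos rfl]
        have e : (test : Int) + 1 = ((test + 1 : Nat) : Int) := by push_cast; ring
        rw [e, ih (f + 1) (test + 1) (by omega) (by omega)]
        constructor
        · intro h k hk
          cases k with
          | zero => exact ⟨by omega, by simpa using hgd⟩
          | succ k' =>
            have hx := h k' (by omega)
            rwa [show test + 1 + k' = test + (k' + 1) by omega] at hx
        · intro h k hk
          have hx := h (k + 1) (by omega)
          rwa [show test + (k + 1) = test + 1 + k by omega] at hx
      · rw [if_neg hdot]
        constructor
        · intro h; omega
        · intro h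
          have h0' := (h 0 (by omega)).2
          rw [Nat.add_zero] at h0'
          exact absurd (hgd ▸ h0') hdot

theorem loopA_nonpos (lst : List String) (key : String) (block jind : Int) (hb : block ≤ 0) :
    ∀ (d iN : Nat), jind.toNat - iN = d → pvLoopA lst key block jind (iN : Int) = lst := by
  intro d
  induction d with
  | zero =>
    intro iN hd
    rw [pvLoopA, dif_neg (by omega)]
  | succ d ih =>
    intro iN hd
    by_cases hlt : (iN : Int) < jind
    · rw [pvLoopA, dif_pos hlt]
      have hw : pvWhileA lst block 0 (iN : Int) = 0 := by
        rw [pvWhileA, dif_neg (by omega)]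
      have hfb : (if PySem.List.pyGet? lst (iN : Int) = some "." then pvWhileA lst block 0 (iN : Int) else 0) = 0 := by
        split <;> [exact hw; rfl]
      simp only [hfb]
      by_cases hz : (0 : Int) = block
      · rw [if_pos hz]
        have : block.toNat = 0 := by omega
        rw [this]; rfl
      · rw [if_neg hz]
        have e : (iN : Int) + 1 = ((iN + 1 : Nat) : Int) := by push_cast; ring
        rw [e]
        exact ih (iN + 1) (by omega)
    · rw [pvLoopA, dif_neg hlt]

theorem loopA_go (lst : List String) (key : String) (block jind : Int) (hb : 1 ≤ block) :
    ∀ (d iN : Nat), jind.toNat - iN = d →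
      (∀ i' < iN, pvSlot lst block.toNat i' = false) →
      pvLoopA lst key block jind (iN : Int) =
        (match pvFirst lst block.toNat jind.toNat with
         | some i => pvWriteA lst key (i : Int) (jind + 1) block.toNat
         | none => lst) := by
  intro d
  induction d with
  | zero =>
    intro iN hd hmin
    rw [pvLoopA, dif_neg (by omega)]
    have hnone : pvFirst lst block.toNat jind.toNat = none := by
      rw [pvFirst, List.find?_eq_none]
      intro x hx
      simp only [List.mem_range] at hx
      simp [hmin x (by omega)]
    rw [hnone]
  | succ d ih =>
    intro iN hd hmin
    by_cases hlt : (iN : Int) < jind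
    · rw [pvLoopA, dif_pos hlt]
      by_cases hs : pvSlot lst block.toNat iN = true
      · simp only [pvSlot, decide_eq_true_eq] at hs
        obtain ⟨hsl, hsd⟩ := hs
        have hbn : (1 : Nat) ≤ block.toNat := by omega
        have hg : PySem.List.pyGet? lst (iN : Int) = some "." := by
          rw [PySem.List.pyGet?_natCast, List.getElem?_eq_getElem (by omega)]
          have := hsd 0 (by omega)
          rw [Nat.add_zero] at this
          rw [List.getD_eq_getElem?_getD, List.getElem?_eq_getElem (by omega)] at this
          simpa using this
        have hwhile : pvWhileA lst block 0 (iN : Int) = block := by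
          rw [whileA_iff lst block block.toNat 0 iN (by omega) (by omega)]
          intro k hk
          exact ⟨by omega, hsd k hk⟩
        have hfb : (if PySem.List.pyGet? lst (iN : Int) = some "." then pvWhileA lst block 0 (iN : Int) else 0) = block := by
          rw [if_pos hg]; exact hwhile
        rw [hfb, if_pos rfl]
        have hfirst : pvFirst lst block.toNat jind.toNat = some iN := by
          apply range_find?_eq_some (by omega) (by simp only [pvSlot, decide_eq_true_eq]; exact ⟨hsl, hsd⟩)
          intro i' hi'
          exact hmin i' hi'
        rw [hfirst]
      · have hsf : pvSlot lst block.toNat iN = false := by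
          cases h : pvSlot lst block.toNat iN
          · rfl
          · exact absurd h hs
        have hfb : (if PySem.List.pyGet? lst (iN : Int) = some "." then pvWhileA lst block 0 (iN : Int) else 0) ≠ block := by
          split
          · intro hc
            rw [whileA_iff lst block block.toNat 0 iN (by omega) (by omega)] at hc
            apply hs
            simp only [pvSlot, decide_eq_true_eq]
            constructor
            · have := (hc (block.toNat - 1) (by omega)).1
              omega
            · intro k hk; exact (hc k hk).2
          · omega
        rw [if_neg hfb]
        have e : (iN : Int) + 1 = ((iN + 1 : Nat) : Int) := by push_cast; ring
        rw [e]
        apply ih (iN + 1) (by omega)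
        intro i' hi'
        rcases Nat.lt_or_ge i' iN with h | h
        · exact hmin i' h
        · have : i' = iN := by omega
          subst this; exact hsf
    · rw [pvLoopA, dif_neg hlt]
      have hnone : pvFirst lst block.toNat jind.toNat = none := by
        rw [pvFirst, List.find?_eq_none]
        intro x hx
        simp only [List.mem_range] at hx
        exact (by simp [hmin x (by omega)] : ¬ pvSlot lst block.toNat x = true)
      rw [hnone]

theorem loopB_go (lst : List String) (key : String) (block jind : Int) (hb : 1 ≤ block)
    (limit : Nat) (hlim : limit = min lst.length (jind + block - 1).toNat) :
    ∀ (d t : Nat) (run : Int), limit - t = d → run = (pvRun lst t : Int) → run < block →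
      (∀ i < jind.toNat, pvSlot lst block.toNat i = true → t ≤ i + block.toNat - 1) →
      pvLoopB lst key block jind limit t run =
        (match pvFirst lst block.toNat jind.toNat with
         | some i =>
             pvSetSeg
               (pvSetSeg lst i (List.replicate block.toNat key))
               (jind + 1).toNat (List.replicate block.toNat ".")
         | none => lst) := by
  have hbn : block.toNat = block := by omega
  intro d
  induction d with
  | zero =>
    intro t run hd hrun hrb hmin
    rw [pvLoopB, dif_neg (by omega)]
    have hnone : pvFirst lst block.toNat jind.toNat = none := by
      rw [pvFirst, List.find?_eq_none]
      intro x hx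
      simp only [List.mem_range] at hx
      intro hp
      have ht := hmin x hx hp
      simp only [pvSlot, decide_eq_true_eq] at hp
      have : x + block.toNat - 1 < limit := by omega
      omega
    rw [hnone]
  | succ d ih =>
    intro t run hd hrun hrb hmin
    have htl : t < limit := by omega
    rw [pvLoopB, dif_pos htl]
    by_cases hdot : lst.getD t "" = "."
    · rw [if_pos hdot]
      have hrt1 : pvRun lst (t + 1) = pvRun lst t + 1 := by
        simp only [pvRun, if_pos hdot]
      by_cases hfire : run + 1 = block
      · rw [if_pos hfire]
        have hrunval : pvRun lst (t + 1) = block.toNat := by omega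
        have hwin := (pvRun_ge_iff lst (t + 1) block.toNat).mp (by omega)
        obtain ⟨hw1, hw2⟩ := hwin
        have hslot : pvSlot lst block.toNat (t + 1 - block.toNat) = true := by
          simp only [pvSlot, decide_eq_true_eq]
          constructor
          · omega
          · intro k hk
            have := hw2 k hk
            rwa [show t + 1 - block.toNat + k = t + 1 - block.toNat + k by rfl] at this
        have hfirst : pvFirst lst block.toNat jind.toNat = some (t + 1 - block.toNat) := by
          apply range_find?_eq_some (by omega) hslot
          intro i' hi'
          by_contra hc
          have hpc : pvSlot lst block.toNat i' = true := by
            cases h : pvSlot lst block.toNat i'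
            · exact absurd h hc
            · rfl
          have hij : i' < jind.toNat := by
            simp only [pvSlot, decide_eq_true_eq] at hpc
            omega
          have := hmin i' hij hpc
          omega
        rw [hfirst]
      · rw [if_neg hfire]
        apply ih (t + 1) (run + 1) (by omega) (by omega) (by omega)
        intro i hi hp
        have ht := hmin i hi hp
        by_contra hc
        have hteq : t = i + block.toNat - 1 := by omega
        simp only [pvSlot, decide_eq_true_eq] at hp
        have hge := (pvRun_ge_iff lst (t + 1) block.toNat).mpr
          ⟨by omega, by
            intro k hk
            have := hp.2 k hk
            rwa [show t + 1 - block.toNat + k = i + k by omega]⟩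
        omega
    · rw [if_neg hdot]
      apply ih (t + 1) 0 (by omega) (by simp only [pvRun, if_neg hdot]; rfl) (by omega)
      intro i hi hp
      have ht := hmin i hi hp
      by_contra hc
      have hteq : t = i + block.toNat - 1 := by omega
      simp only [pvSlot, decide_eq_true_eq] at hp
      have := hp.2 (block.toNat - 1) (by omega)
      rw [show i + (block.toNat - 1) = t by omega] at this
      exact hdot this

theorem setSeg_getElem? (lst vals : List String) (s : Nat) (h : s + vals.length ≤ lst.length)
    (p : Nat) :
    (pvSetSeg lst s vals)[p]? = if s ≤ p ∧ p < s + vals.length then vals[p - s]? else lst[p]? := by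
  unfold pvSetSeg
  have hts : (lst.take s).length = s := by simp; omega
  by_cases h1 : p < s
  · rw [List.getElem?_append_left (by simp [hts]; omega)]
    rw [List.getElem?_append_left (by omega)]
    rw [if_neg (by omega)]
    rw [List.getElem?_take_of_lt h1]
  · by_cases h2 : p < s + vals.length
    · rw [List.getElem?_append_left (by simp [hts]; omega)]
      rw [List.getElem?_append_right (by omega)]
      rw [if_pos ⟨by omega, h2⟩, hts]
    · rw [List.getElem?_append_right (by simp [hts]; omega)]
      rw [if_neg (by omega)]
      rw [List.getElem?_drop]
      congr 1
      simp [hts]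
      omega

theorem setSeg_length (lst vals : List String) (s : Nat) (h : s + vals.length ≤ lst.length) :
    (pvSetSeg lst s vals).length = lst.length := by
  simp [pvSetSeg]; omega

theorem writeA_getElem? (key : String) :
    ∀ (n : Nat) (lst : List String) (r m : Nat), r < m → m + n ≤ lst.length →
      ∀ p : Nat, (pvWriteA lst key (r : Int) (m : Int) n)[p]? =
        if r ≤ p ∧ p < r + n then some key
        else if m ≤ p ∧ p < m + n then some "." else lst[p]? := by
  intro n
  induction n with
  | zero =>
    intro lst r m hrm hlen p
    rw [pvWriteA]
    split_ifs with h1 h2 <;> first | rfl | omega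
  | succ n ih =>
    intro lst r m hrm hlen p
    rw [pvWriteA]
    have e1 : (r : Int) + 1 = ((r + 1 : Nat) : Int) := by push_cast; ring
    have e2 : (m : Int) + 1 = ((m + 1 : Nat) : Int) := by push_cast; ring
    rw [e1, e2]
    have hset : PySem.List.pySetD (PySem.List.pySetD lst (r : Int) key) (m : Int) "." =
        (lst.set r key).set m "." := by
      simp [PySem.List.pySetD_natCast]
    rw [hset]
    rw [ih _ (r + 1) (m + 1) (by omega) (by simp; omega) p]
    have hlst : ((lst.set r key).set m ".")[p]? =
        if p = m then some "." else if p = r then some key else lst[p]? := by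
      by_cases hpm : p = m
      · subst hpm
        rw [if_pos rfl]
        rw [List.getElem?_set_self (by simp; omega)]
      · rw [if_neg hpm]
        rw [List.getElem?_set_ne (by omega)]
        by_cases hpr : p = r
        · subst hpr
          rw [if_pos rfl, List.getElem?_set_self (by omega)]
        · rw [if_neg hpr, List.getElem?_set_ne (by omega)]
    rw [hlst]
    split_ifs <;> first | rfl | omega

-- the two write procedures produce the same list on a found slot
theorem write_eq (lst : List String) (key : String) (block jind : Int) (hb : 1 ≤ block)
    (i : Nat) (hij : i < jind.toNat) (hslot : pvSlot lst block.toNat i = true)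
    (hkey : PySem.List.pyGet? lst (jind + 1) = some key)
    (hrange : jind + 1 + block ≤ (lst.length : Int)) :
    pvWriteA lst key (i : Int) (jind + 1) block.toNat =
      pvSetSeg (pvSetSeg lst i (List.replicate block.toNat key)) (jind + 1).toNat
        (List.replicate block.toNat ".") := by
  have hj : 1 ≤ jind := by omega
  have hm : (((jind + 1).toNat : Nat) : Int) = jind + 1 := by omega
  set m := (jind + 1).toNat with hmdef
  have hmj : m = jind.toNat + 1 := by omega
  simp only [pvSlot, decide_eq_true_eq] at hslot
  obtain ⟨hsl, hsd⟩ := hslot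
  have hlen : m + block.toNat ≤ lst.length := by omega
  have hkey2 : lst[m]? = some key := by
    rw [← hm] at hkey
    rwa [PySem.List.pyGet?_natCast] at hkey
  apply List.ext_getElem?
  intro p
  rw [show (jind + 1 : Int) = ((m : Nat) : Int) from hm.symm]
  rw [writeA_getElem? key block.toNat lst i m (by omega) (by omega) p]
  have hlen1 : i + (List.replicate block.toNat key).length ≤ lst.length := by simp; omega
  have hlen2 : m + (List.replicate block.toNat ".").length ≤
      (pvSetSeg lst i (List.replicate block.toNat key)).length := by
    rw [setSeg_length _ _ _ hlen1]; simp; omega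
  rw [setSeg_getElem? _ _ _ hlen2 p]
  rw [setSeg_getElem? _ _ _ hlen1 p]
  simp only [List.length_replicate]
  by_cases hk1 : i ≤ p ∧ p < i + block.toNat
  · by_cases hk2 : m ≤ p ∧ p < m + block.toNat
    · have hdot := hsd (m - i) (by omega)
      rw [show i + (m - i) = m by omega] at hdot
      have hkd : key = "." := by
        rw [List.getD_eq_getElem?_getD, hkey2] at hdot
        simpa using hdot
      subst hkd
      simp only [if_pos hk1, if_pos hk2]
      rw [List.getElem?_replicate_of_lt (by omega)]
    · simp only [if_pos hk1, if_neg hk2]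
      rw [List.getElem?_replicate_of_lt (by omega)]
  · by_cases hk2 : m ≤ p ∧ p < m + block.toNat
    · simp only [if_neg hk1, if_pos hk2]
      rw [List.getElem?_replicate_of_lt (by omega)]
    · simp only [if_neg hk1, if_neg hk2]

-- ===== VERDICT (by name: the statement is the Claim_ definition above) =====
theorem findSlot_spec : Claim_equal_findSlot := by
  intro lst block jind _hdom hpre
  obtain ⟨hkr, hpre2⟩ := hpre
  unfold Spec_findSlot
  obtain ⟨key, hkey⟩ : ∃ key, PySem.List.pyGet? lst (jind + 1) = some key := by
    cases h : PySem.List.pyGet? lst (jind + 1) with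
    | none => exact absurd hkr ((PySem.List.pyGet?_eq_none_iff lst (jind + 1)).mp h)
    | some k => exact ⟨k, rfl⟩
  simp only [findSlot, findSlot_alt, hkey]
  by_cases hb : block ≤ 0
  · rw [if_pos hb]
    have := loopA_nonpos lst key block jind hb jind.toNat 0 (by omega)
    simpa using this
  · have hb1 : 1 ≤ block := by omega
    rw [if_neg hb]
    have hA := loopA_go lst key block jind hb1 jind.toNat 0 (by omega)
      (fun i' hi' => absurd hi' (by omega))
    simp only [Nat.cast_zero] at hA
    rw [hA]
    rw [loopB_go lst key block jind hb1 (min lst.length (jind + block - 1).toNat) rfl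
      (min lst.length (jind + block - 1).toNat) 0 0 (by omega) (by simp [pvRun]) (by omega)
      (fun i hi hs => by omega)]
    cases hf : pvFirst lst block.toNat jind.toNat with
    | none => rfl
    | some i =>
      have hp : pvSlot lst block.toNat i = true := List.find?_some hf
      have hij : i < jind.toNat := by
        have := List.mem_of_find?_eq_some hf
        simpa [List.mem_range] using this
      have hj1 : 1 ≤ jind := by omega
      simp only [pvSlot, decide_eq_true_eq] at hp
      obtain ⟨hsl, hsd⟩ := hp
      have hrange : jind + 1 + block ≤ (lst.length : Int) := by
        rcases hpre2 hb1 hj1 with h | h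
        · exact h
        · exfalso
          apply h
          refine ⟨i, by omega, by omega, ?_⟩
          intro j hjl hij2 hjb
          have hk : j - i < block.toNat := by omega
          have := hsd (j - i) hk
          rwa [show i + (j - i) = j by omega] at this
      exact write_eq lst key block jind hb1 i hij
        (by simp only [pvSlot, decide_eq_true_eq]; exact ⟨hsl, hsd⟩) hkey hrange
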